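-- pv_equiv track=rewrite | github.com/fastrizwaan/tts | vte23.py | get_indent
-- ===== SOURCE A (Python) =====
-- def get_indent(line, tab_width=4):
--     """
--     Returns indentation level in 'virtual columns'.
--     Tabs count as tab_width columns.
--     """
--     count = 0
--     for ch in line:
--         if ch == ' ':
--             count += 1
--         elif ch == '\t':
--             count += tab_width
--         else:
--             break
--     return count
-- ===== SOURCE B (Python) =====
-- from itertools import takewhile
--
-- def get_indent(line, tab_width=4):
--     prefix = "".join(takewhile(lambda c: c in ' \t', line))
--     return prefix.count(' ') + prefix.count('\t') * tab_width
-- ===== Notes on version B (the rewrite author's own statement) =====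
-- stated objective: alternative
-- what changed: Replaces the single interleaved accumulate-and-break loop with prefix extraction via itertools.takewhile followed by two per-character-type counts over the prefix.
import Mathlib
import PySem

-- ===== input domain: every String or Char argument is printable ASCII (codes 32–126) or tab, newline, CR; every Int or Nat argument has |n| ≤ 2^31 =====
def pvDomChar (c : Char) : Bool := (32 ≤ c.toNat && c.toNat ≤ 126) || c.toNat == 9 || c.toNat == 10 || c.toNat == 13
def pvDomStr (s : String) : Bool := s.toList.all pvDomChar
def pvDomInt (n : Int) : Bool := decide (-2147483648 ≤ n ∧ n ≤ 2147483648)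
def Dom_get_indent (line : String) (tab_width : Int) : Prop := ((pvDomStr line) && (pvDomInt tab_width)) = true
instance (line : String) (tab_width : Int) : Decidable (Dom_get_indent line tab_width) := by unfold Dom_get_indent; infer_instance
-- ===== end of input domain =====

-- ===== PORT A =====
-- loop with break: structural recursion over the chars carrying the count
def get_indent_go (tab_width : Int) : List Char → Int → Int
  | [], count => count
  | c :: cs, count =>
    if c = ' ' then get_indent_go tab_width cs (count + 1)
    else if c = '\t' then get_indent_go tab_width cs (count + tab_width)
    else count

def get_indent (line : String) (tab_width : Int) : Int :=
  get_indent_go tab_width line.toList 0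

-- ===== PORT B =====
-- B: takewhile prefix, then count each char type separately
def get_indent_alt (line : String) (tab_width : Int) : Int :=
  let pre := line.toList.takeWhile (fun c => c = ' ' || c = '\t')
  (PySem.List.count pre ' ' : Int) + (PySem.List.count pre '\t' : Int) * tab_width

-- ===== PRECONDITION & SPEC =====
def Spec_get_indent (line : String) (tab_width : Int) (out : Int) : Prop := out = get_indent_alt line tab_width
instance (line : String) (tab_width : Int) (out : Int) : Decidable (Spec_get_indent line tab_width out) := by unfold Spec_get_indent; infer_instance

-- ===== CLAIM (what is proved, stated in full; the proofs are below) =====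
def Claim_equal_get_indent : Prop := ∀ (line : String) (tab_width : Int), Dom_get_indent line tab_width → Spec_get_indent line tab_width (get_indent line tab_width)

-- ===== LEMMAS AND PROOFS =====

-- ===== VERDICT (by name: the statement is the Claim_ definition above) =====
theorem go_eq (tw : Int) (l : List Char) (count : Int) :
    get_indent_go tw l count =
      count + (PySem.List.count (l.takeWhile (fun c => c = ' ' || c = '\t')) ' ' : Int)
            + (PySem.List.count (l.takeWhile (fun c => c = ' ' || c = '\t')) '\t' : Int) * tw := by
  induction l generalizing count with
  | nil => simp [get_indent_go, PySem.List.count]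
  | cons c cs ih =>
    by_cases hs : c = ' '
    · subst hs
      simp [get_indent_go, List.takeWhile, PySem.List.count, ih]
      ring
    · by_cases ht : c = '\t'
      · subst ht
        simp [get_indent_go, List.takeWhile, PySem.List.count, ih]
        ring
      · simp [get_indent_go, List.takeWhile, hs, ht, PySem.List.count]

theorem get_indent_spec : Claim_equal_get_indent := by
  intro line tw _
  unfold Spec_get_indent get_indent get_indent_alt
  simp [go_eq]
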